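-- pv_equiv track=rewrite | github.com/wavce/classificationx | models/resnext.py | _get_weight_name_map
-- ===== SOURCE A (Python) =====
-- def _get_weight_name_map(blocks, use_se):
--     name_map = {
--         "conv0/conv2d/kernel:0": "resnext0_conv0_weight",
--         "conv0/batch_norm/gamma:0": "resnext0_batchnorm0_gamma",
--         "conv0/batch_norm/beta:0": "resnext0_batchnorm0_beta",
--         "conv0/batch_norm/moving_mean:0": "resnext0_batchnorm0_running_mean",
--         "conv0/batch_norm/moving_variance:0": "resnext0_batchnorm0_running_var"
--     }
--
--     for i, b in enumerate(blocks, 1):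
--         n = 0
--         for j in range(b):
--             k = 4 if j == 0 else 3
--             k = k + 2 if use_se else k
--             for _ in range(k):
--                 name_map["stage%d/conv%d/conv2d/kernel:0" % (i, n)] = "resnext0_stage%d_conv%d_weight" % (i, n)
--                 name_map["stage%d/conv%d/batch_norm/gamma:0" % (i, n)] = "resnext0_stage%d_batchnorm%d_gamma" % (i, n)
--                 name_map["stage%d/conv%d/batch_norm/beta:0" % (i, n)] = "resnext0_stage%d_batchnorm%d_beta" % (i, n)
--                 name_map["stage%d/conv%d/batch_norm/moving_mean:0" % (i, n)] = "resnext0_stage%d_batchnorm%d_running_mean" % (i, n)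
--                 name_map["stage%d/conv%d/batch_norm/moving_variance:0" % (i, n)] = "resnext0_stage%d_batchnorm%d_running_var" % (i, n)
--                 n += 1
--
--     name_map["logits/kernel:0"] = "resnext0_dense0_weight"
--     name_map["logits/bias:0"] = "resnext0_dense0_bias"
--
--     return name_map
-- ===== SOURCE B (Python) =====
-- def _get_weight_name_map(blocks, use_se):
--     head = [
--         ("conv0/conv2d/kernel:0", "resnext0_conv0_weight"),
--         ("conv0/batch_norm/gamma:0", "resnext0_batchnorm0_gamma"),
--         ("conv0/batch_norm/beta:0", "resnext0_batchnorm0_beta"),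
--         ("conv0/batch_norm/moving_mean:0", "resnext0_batchnorm0_running_mean"),
--         ("conv0/batch_norm/moving_variance:0", "resnext0_batchnorm0_running_var"),
--     ]
--
--     def unit_pairs(i, n):
--         return [
--             ("stage%d/conv%d/conv2d/kernel:0" % (i, n), "resnext0_stage%d_conv%d_weight" % (i, n)),
--             ("stage%d/conv%d/batch_norm/gamma:0" % (i, n), "resnext0_stage%d_batchnorm%d_gamma" % (i, n)),
--             ("stage%d/conv%d/batch_norm/beta:0" % (i, n), "resnext0_stage%d_batchnorm%d_beta" % (i, n)),
--             ("stage%d/conv%d/batch_norm/moving_mean:0" % (i, n), "resnext0_stage%d_batchnorm%d_running_mean" % (i, n)),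
--             ("stage%d/conv%d/batch_norm/moving_variance:0" % (i, n), "resnext0_stage%d_batchnorm%d_running_var" % (i, n)),
--         ]
--
--     # closed-form number of conv units in a stage of b blocks
--     def units(b):
--         return 0 if b <= 0 else 4 + 3 * (b - 1) + (2 * b if use_se else 0)
--
--     stage_pairs = [p
--                    for i, b in enumerate(blocks, 1)
--                    for n in range(units(b))
--                    for p in unit_pairs(i, n)]
--
--     tail = [
--         ("logits/kernel:0", "resnext0_dense0_weight"),
--         ("logits/bias:0", "resnext0_dense0_bias"),
--     ]
--
--     return dict(head + stage_pairs + tail)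
-- ===== Notes on version B (the rewrite author's own statement) =====
-- stated objective: simpler
-- what changed: B builds the whole (key, value) pair list declaratively - fixed head, a single comprehension over stages using a closed-form per-stage unit count (4 + 3*(b-1) + optional 2*b) in place of A's nested j/k counting loops, fixed tail - and constructs the dict once from that list, instead of A's imperative dict mutation inside three nested loops.
import Mathlib
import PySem

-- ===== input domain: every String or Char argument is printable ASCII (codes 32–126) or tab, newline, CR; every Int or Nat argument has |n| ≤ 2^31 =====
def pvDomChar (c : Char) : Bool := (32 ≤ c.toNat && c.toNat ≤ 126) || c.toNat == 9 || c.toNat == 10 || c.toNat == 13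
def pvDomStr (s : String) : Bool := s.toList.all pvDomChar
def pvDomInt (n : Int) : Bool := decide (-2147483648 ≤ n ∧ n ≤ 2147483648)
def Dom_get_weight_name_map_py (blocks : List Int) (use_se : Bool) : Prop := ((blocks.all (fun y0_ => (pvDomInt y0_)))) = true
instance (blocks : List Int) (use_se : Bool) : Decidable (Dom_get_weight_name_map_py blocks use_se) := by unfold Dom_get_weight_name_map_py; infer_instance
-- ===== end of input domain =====

-- B builds the whole pair list declaratively (head ++ closed-form-counted stage comprehension ++ tail)
-- and makes one dict of it, instead of A's imperative dict mutation in nested loops (objective: simpler).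

-- ===== PORT A =====
-- the five dict assignments of A's innermost loop body
def pvIns5 (i n : Int) (d : PySem.Dict String String) : PySem.Dict String String :=
  let si := PySem.Int.toStr i
  let sn := PySem.Int.toStr n
  let d := d.insert ("stage" ++ si ++ "/conv" ++ sn ++ "/conv2d/kernel:0") ("resnext0_stage" ++ si ++ "_conv" ++ sn ++ "_weight")
  let d := d.insert ("stage" ++ si ++ "/conv" ++ sn ++ "/batch_norm/gamma:0") ("resnext0_stage" ++ si ++ "_batchnorm" ++ sn ++ "_gamma")
  let d := d.insert ("stage" ++ si ++ "/conv" ++ sn ++ "/batch_norm/beta:0") ("resnext0_stage" ++ si ++ "_batchnorm" ++ sn ++ "_beta")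
  let d := d.insert ("stage" ++ si ++ "/conv" ++ sn ++ "/batch_norm/moving_mean:0") ("resnext0_stage" ++ si ++ "_batchnorm" ++ sn ++ "_running_mean")
  let d := d.insert ("stage" ++ si ++ "/conv" ++ sn ++ "/batch_norm/moving_variance:0") ("resnext0_stage" ++ si ++ "_batchnorm" ++ sn ++ "_running_var")
  d

def pvInit : PySem.Dict String String :=
  PySem.Dict.ofList [
    ("conv0/conv2d/kernel:0", "resnext0_conv0_weight"),
    ("conv0/batch_norm/gamma:0", "resnext0_batchnorm0_gamma"),
    ("conv0/batch_norm/beta:0", "resnext0_batchnorm0_beta"),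
    ("conv0/batch_norm/moving_mean:0", "resnext0_batchnorm0_running_mean"),
    ("conv0/batch_norm/moving_variance:0", "resnext0_batchnorm0_running_var")]

def get_weight_name_map_py (blocks : List Int) (use_se : Bool) : List (String × String) :=
  let d := (PySem.List.enumerate blocks 1).foldl (fun d ib =>
    let i := ib.1
    let b := ib.2
    -- n = 0; for j in range(b): k = …; for _ in range(k): <5 assignments>; n += 1
    ((PySem.List.pyRange 0 b 1).foldl (fun (s : PySem.Dict String String × Int) j =>
        let k : Int := if j == 0 then 4 else 3
        let k : Int := if use_se then k + 2 else k
        (PySem.List.pyRange 0 k 1).foldl (fun s2 _ => (pvIns5 i s2.2 s2.1, s2.2 + 1)) s)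
      (d, 0)).1) pvInit
  let d := d.insert "logits/kernel:0" "resnext0_dense0_weight"
  let d := d.insert "logits/bias:0" "resnext0_dense0_bias"
  d.items

-- ===== PORT B =====
-- unit_pairs(i, n): the five (tf-name, gluon-name) pairs of one conv unit
def pvUnitPairs (i n : Int) : List (String × String) :=
  let si := PySem.Int.toStr i
  let sn := PySem.Int.toStr n
  [("stage" ++ si ++ "/conv" ++ sn ++ "/conv2d/kernel:0", "resnext0_stage" ++ si ++ "_conv" ++ sn ++ "_weight"),
   ("stage" ++ si ++ "/conv" ++ sn ++ "/batch_norm/gamma:0", "resnext0_stage" ++ si ++ "_batchnorm" ++ sn ++ "_gamma"),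
   ("stage" ++ si ++ "/conv" ++ sn ++ "/batch_norm/beta:0", "resnext0_stage" ++ si ++ "_batchnorm" ++ sn ++ "_beta"),
   ("stage" ++ si ++ "/conv" ++ sn ++ "/batch_norm/moving_mean:0", "resnext0_stage" ++ si ++ "_batchnorm" ++ sn ++ "_running_mean"),
   ("stage" ++ si ++ "/conv" ++ sn ++ "/batch_norm/moving_variance:0", "resnext0_stage" ++ si ++ "_batchnorm" ++ sn ++ "_running_var")]

-- units(b): closed-form number of conv units in a stage of b blocks
def pvUnits (b : Int) (use_se : Bool) : Int :=
  if b ≤ 0 then 0 else 4 + 3 * (b - 1) + (if use_se then 2 * b else 0)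

def get_weight_name_map_py_alt (blocks : List Int) (use_se : Bool) : List (String × String) :=
  let head : List (String × String) := [
    ("conv0/conv2d/kernel:0", "resnext0_conv0_weight"),
    ("conv0/batch_norm/gamma:0", "resnext0_batchnorm0_gamma"),
    ("conv0/batch_norm/beta:0", "resnext0_batchnorm0_beta"),
    ("conv0/batch_norm/moving_mean:0", "resnext0_batchnorm0_running_mean"),
    ("conv0/batch_norm/moving_variance:0", "resnext0_batchnorm0_running_var")]
  let stage_pairs : List (String × String) :=
    (PySem.List.enumerate blocks 1).flatMap (fun ib =>
      (PySem.List.pyRange 0 (pvUnits ib.2 use_se) 1).flatMap (fun n => pvUnitPairs ib.1 n))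
  let tail : List (String × String) := [
    ("logits/kernel:0", "resnext0_dense0_weight"),
    ("logits/bias:0", "resnext0_dense0_bias")]
  (PySem.Dict.ofList (head ++ stage_pairs ++ tail)).items

-- ===== PRECONDITION & SPEC =====
def Spec_get_weight_name_map_py (blocks : List Int) (use_se : Bool) (out : List (String × String)) : Prop := out = get_weight_name_map_py_alt blocks use_se
instance (blocks : List Int) (use_se : Bool) (out : List (String × String)) : Decidable (Spec_get_weight_name_map_py blocks use_se out) := by unfold Spec_get_weight_name_map_py; infer_instance

-- ===== CLAIM (what is proved, stated in full; the proofs are below) =====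
def Claim_equal_get_weight_name_map_py : Prop := ∀ (blocks : List Int) (use_se : Bool), Dom_get_weight_name_map_py blocks use_se → Spec_get_weight_name_map_py blocks use_se (get_weight_name_map_py blocks use_se)

-- ===== LEMMAS AND PROOFS =====

-- [n, n+1, …, n+m-1]
def pvIntRange (n : Int) (m : Nat) : List Int := (List.range m).map (fun (x : Nat) => n + (x : Int))

theorem pvIntRange_succ (n : Int) (m : Nat) :
    pvIntRange n (m + 1) = n :: pvIntRange (n + 1) m := by
  unfold pvIntRange
  rw [List.range_succ_eq_map, List.map_cons, List.map_map]
  refine congrArg₂ _ (by simp) ?_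
  refine List.map_congr_left (fun x _ => ?_)
  simp only [Function.comp_apply]
  push_cast
  ring

theorem pvIntRange_add (n : Int) (a b : Nat) :
    pvIntRange n (a + b) = pvIntRange n a ++ pvIntRange (n + a) b := by
  unfold pvIntRange
  rw [List.range_add, List.map_append, List.map_map]
  refine congrArg₂ _ rfl ?_
  refine List.map_congr_left (fun x _ => ?_)
  simp only [Function.comp_apply]
  push_cast
  ring

-- split [n, …, n+c-1] at a
theorem pvIntRange_append (n p : Int) (a b c : Nat) (h1 : p = n + (a : Int)) (h2 : c = a + b) :
    pvIntRange n a ++ pvIntRange p b = pvIntRange n c := by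
  subst h1 h2
  rw [pvIntRange_add]

-- the innermost 'for _ in range(k)' loop, as a fold over any list, flattens to pvIns5 over consecutive n
theorem pvRep (i : Int) (l : List Int) : ∀ (d : PySem.Dict String String) (n : Int),
    l.foldl (fun s2 _ => (pvIns5 i s2.2 s2.1, s2.2 + 1)) (d, n)
      = ((pvIntRange n l.length).foldl (fun d x => pvIns5 i x d) d, n + l.length) := by
  induction l with
  | nil => intro d n; simp [pvIntRange]
  | cons hd tl ih =>
    intro d n
    simp only [List.foldl_cons, List.length_cons, ih, pvIntRange_succ]
    simp only [Prod.mk.injEq]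
    refine ⟨by simp, by push_cast; ring⟩

-- the per-stage tail loop (all j ≠ 0, so k = 3 (+2 with SE) each time)
theorem pvStage_tail (i : Int) (use_se : Bool) (l : List Int) (hl : ∀ j ∈ l, j ≠ 0) :
    ∀ (d : PySem.Dict String String) (n : Int),
    l.foldl (fun (s : PySem.Dict String String × Int) j =>
        let k : Int := if j == 0 then 4 else 3
        let k : Int := if use_se then k + 2 else k
        (PySem.List.pyRange 0 k 1).foldl (fun s2 _ => (pvIns5 i s2.2 s2.1, s2.2 + 1)) s) (d, n)
      = ((pvIntRange n (l.length * (if use_se then 5 else 3))).foldl (fun d x => pvIns5 i x d) d,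
         n + l.length * (if use_se then 5 else 3)) := by
  induction l with
  | nil => intro d n; simp [pvIntRange]
  | cons hd tl ih =>
    intro d n
    have hne : hd ≠ 0 := hl hd (by simp)
    have hk : ((if (hd == 0) then (4:Int) else 3) = 3) := by simp [hne]
    simp only [List.foldl_cons, hk]
    rw [pvRep]
    rw [ih (fun j hj => hl j (by simp [hj]))]
    have hlen : (PySem.List.pyRange 0 (if use_se then (3:Int) + 2 else 3) 1).length
        = (if use_se then 5 else 3) := by
      cases use_se <;> simp [PySem.List.length_pyRange_one]
    rw [hlen]
    simp only [Prod.mk.injEq]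
    constructor
    · rw [← List.foldl_append,
        pvIntRange_append n (n + ((if use_se then 5 else 3 : Nat) : Int))
          (if use_se then 5 else 3) (tl.length * (if use_se then 5 else 3))
          ((hd :: tl).length * (if use_se then 5 else 3)) rfl
          (by cases use_se <;> simp [List.length_cons] <;> ring)]
    · cases use_se <;> simp <;> push_cast <;> omega

-- one whole stage of A equals a flat pvIns5 loop over the closed-form unit count
theorem pvStage (i b : Int) (use_se : Bool) (d : PySem.Dict String String) :
    ((PySem.List.pyRange 0 b 1).foldl (fun (s : PySem.Dict String String × Int) j =>
        let k : Int := if j == 0 then 4 else 3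
        let k : Int := if use_se then k + 2 else k
        (PySem.List.pyRange 0 k 1).foldl (fun s2 _ => (pvIns5 i s2.2 s2.1, s2.2 + 1)) s)
      (d, 0)).1
    = (PySem.List.pyRange 0 (pvUnits b use_se) 1).foldl (fun d n => pvIns5 i n d) d := by
  unfold pvUnits
  by_cases hb : b ≤ 0
  · rw [PySem.List.pyRange_one_eq_nil hb, if_pos hb, PySem.List.pyRange_one_eq_nil (by omega)]
    rfl
  · have hb' : (0:Int) < b := by omega
    rw [if_neg (by omega)]
    rw [PySem.List.pyRange_one_cons hb']
    simp only [List.foldl_cons]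
    have h0 : ((0:Int) == 0) = true := by decide
    simp only [h0, if_true]
    rw [pvRep]
    have hk0 : (PySem.List.pyRange 0 (if use_se then (4:Int) + 2 else 4) 1).length
        = (if use_se then 6 else 4) := by
      cases use_se <;> simp [PySem.List.length_pyRange_one]
    rw [hk0]
    rw [pvStage_tail i use_se _ (fun j hj => by
      have := (PySem.List.mem_pyRange_one.mp hj).1; omega)]
    simp only [zero_add]
    rw [← List.foldl_append]
    have hlen : (PySem.List.pyRange 1 b 1).length = (b - 1).toNat := by
      simp [PySem.List.length_pyRange_one]
    rw [hlen]
    have hrange : PySem.List.pyRange 0 (4 + 3 * (b - 1) + (if use_se then 2 * b else 0)) 1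
        = pvIntRange 0 ((if use_se then 6 else 4) + (b - 1).toNat * (if use_se then 5 else 3)) := by
      rw [PySem.List.pyRange_one]
      unfold pvIntRange
      refine congrArg₂ _ rfl (congrArg _ ?_)
      cases use_se <;> simp only [if_true, if_false, Bool.false_eq_true] <;> omega
    rw [hrange]
    rw [pvIntRange_append 0 (((if use_se then 6 else 4 : Nat) : Int))
      (if use_se then 6 else 4) ((b - 1).toNat * (if use_se then 5 else 3))
      ((if use_se then 6 else 4) + (b - 1).toNat * (if use_se then 5 else 3))
      (by push_cast; ring) rfl]

theorem pvFold_congr {α β : Type} (l : List α) (fA fB : β → α → β)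
    (h : ∀ d x, fA d x = fB d x) : ∀ d, l.foldl fA d = l.foldl fB d := by
  have hf : fA = fB := funext fun d => funext (h d)
  intro d; rw [hf]

-- folding the 5-pair list of one unit into a dict IS the five assignments of A's body
theorem pvFold_unitPairs (i n : Int) (d : PySem.Dict String String) :
    (pvUnitPairs i n).foldl (fun d p => d.insert p.1 p.2) d = pvIns5 i n d := rfl

-- B, unfolded: dict(head ++ stages ++ tail) as the sequential insertion A performs
theorem pvAlt_unfold (blocks : List Int) (use_se : Bool) :
    get_weight_name_map_py_alt blocks use_se
      = ((((PySem.List.enumerate blocks 1).foldl (fun d ib =>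
            (PySem.List.pyRange 0 (pvUnits ib.2 use_se) 1).foldl
              (fun d n => pvIns5 ib.1 n d) d) pvInit).insert
            "logits/kernel:0" "resnext0_dense0_weight").insert
            "logits/bias:0" "resnext0_dense0_bias").items := by
  unfold get_weight_name_map_py_alt
  show (PySem.Dict.ofList (_ ++ _ ++ _)).items = _
  have hofList : ∀ (L : List (String × String)),
      PySem.Dict.ofList L = L.foldl (fun d p => d.insert p.1 p.2) PySem.Dict.empty := fun _ => rfl
  rw [hofList, List.foldl_append, List.foldl_append, List.foldl_flatMap]
  simp only [List.foldl_cons, List.foldl_nil]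
  refine congrArg _ (congrArg
    (fun d => PySem.Dict.insert d "logits/bias:0" "resnext0_dense0_bias") (congrArg
      (fun d => PySem.Dict.insert d "logits/kernel:0" "resnext0_dense0_weight") ?_))
  have hstep : (fun (d : PySem.Dict String String) (ib : Int × Int) =>
      List.foldl (fun d p => d.insert p.1 p.2) d
        ((PySem.List.pyRange 0 (pvUnits ib.2 use_se) 1).flatMap (fun n => pvUnitPairs ib.1 n)))
      = (fun (d : PySem.Dict String String) (ib : Int × Int) =>
          (PySem.List.pyRange 0 (pvUnits ib.2 use_se) 1).foldl (fun d n => pvIns5 ib.1 n d) d) := by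
    funext d ib
    rw [List.foldl_flatMap]
    exact pvFold_congr _ _ _ (fun d n => pvFold_unitPairs ib.1 n d) d
  rw [hstep]
  rfl

-- ===== VERDICT (by name: the statement is the Claim_ definition above) =====
theorem get_weight_name_map_py_spec : Claim_equal_get_weight_name_map_py := by
  intro blocks use_se _
  unfold Spec_get_weight_name_map_py
  refine Eq.trans ?_ (pvAlt_unfold blocks use_se).symm
  unfold get_weight_name_map_py
  simp only
  rw [pvFold_congr (PySem.List.enumerate blocks 1)
    (fun (d : PySem.Dict String String) (ib : Int × Int) =>
      ((PySem.List.pyRange 0 ib.2 1).foldl (fun (s : PySem.Dict String String × Int) j =>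
          let k : Int := if j == 0 then 4 else 3
          let k : Int := if use_se then k + 2 else k
          (PySem.List.pyRange 0 k 1).foldl (fun s2 _ => (pvIns5 ib.1 s2.2 s2.1, s2.2 + 1)) s)
        (d, 0)).1)
    (fun (d : PySem.Dict String String) (ib : Int × Int) =>
      (PySem.List.pyRange 0 (pvUnits ib.2 use_se) 1).foldl (fun d n => pvIns5 ib.1 n d) d)
    (fun d ib => pvStage ib.1 ib.2 use_se d) pvInit]
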